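-- pv_equiv track=rewrite | github.com/take-works-tech/arc-agi2-arc2025 | src/hybrid_system/data_management/transformation/data_transformer.py | _optimize_program
-- ===== SOURCE A (Python) =====
-- def _optimize_program(program: str) -> str:
--     """プログラム最適化（本格実装）"""
--     lines = program.split('\n')
--     optimized_lines = []
--     seen_lines = set()
--
--     for line in lines:
--         stripped = line.strip()
--         if not stripped or stripped.startswith('#'):
--             # 空行やコメントは保持
--             optimized_lines.append(line)
--             continue
--
--         # 重複する行を除去
--         if stripped not in seen_lines:
--             seen_lines.add(stripped)
--             optimized_lines.append(line)
--         else: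
--             # 重複している場合は、コメントとして残すか、完全に削除
--             # ここでは削除（必要に応じてコメントとして残すことも可能）
--             pass
--
--     # 連続する空行を1つにまとめる
--     result_lines = []
--     prev_empty = False
--     for line in optimized_lines:
--         is_empty = not line.strip()
--         if is_empty and prev_empty:
--             continue
--         result_lines.append(line)
--         prev_empty = is_empty
--
--     return '\n'.join(result_lines)
-- ===== SOURCE B (Python) =====
-- def _optimize_program(program: str) -> str:
--     """Single fused pass: dedup real code lines and collapse blank runs together."""
--     result = []
--     seen = set()
--     prev_empty = False
--     for line in program.split('\n'):
--         stripped = line.strip()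
--         is_code = bool(stripped) and not stripped.startswith('#')
--         if is_code:
--             if stripped in seen:
--                 continue
--             seen.add(stripped)
--         is_empty = not stripped
--         if is_empty and prev_empty:
--             continue
--         result.append(line)
--         prev_empty = is_empty
--     return '\n'.join(result)
-- ===== Notes on version B (the rewrite author's own statement) =====
-- stated objective: simpler
-- what changed: A makes two sequential passes (dedup pass building an intermediate list, then a blank-collapse pass over it); B fuses them into one loop over the input lines carrying the seen set and the prev_empty flag together, never materialising the intermediate list.
import Mathlib
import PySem

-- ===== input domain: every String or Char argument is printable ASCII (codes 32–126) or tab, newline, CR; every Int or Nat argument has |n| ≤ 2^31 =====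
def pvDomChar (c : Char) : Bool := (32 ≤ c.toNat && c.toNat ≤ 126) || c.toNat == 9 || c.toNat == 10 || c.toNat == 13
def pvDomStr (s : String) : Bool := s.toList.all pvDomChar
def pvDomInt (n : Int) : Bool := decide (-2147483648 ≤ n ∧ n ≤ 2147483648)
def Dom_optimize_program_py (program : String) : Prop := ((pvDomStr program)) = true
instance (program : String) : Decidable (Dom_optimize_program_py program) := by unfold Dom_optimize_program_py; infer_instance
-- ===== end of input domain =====

-- B fuses A's two passes (dedup pass, then blank-collapse pass) into one loop
-- maintaining the seen-set and the prev_empty flag together (objective: simpler, one pass).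

-- ===== PORT A =====
-- first loop of A: keep blank/comment lines, keep a code line only on first occurrence of its strip
def pvDedupPass (lines : List String) (seen : PySem.Set String) : List String :=
  match lines with
  | [] => []
  | line :: rest =>
    let stripped := PySem.Str.strip line
    if stripped = "" || PySem.Str.startswith stripped "#" then
      line :: pvDedupPass rest seen
    else if ¬ (stripped ∈ seen) then
      line :: pvDedupPass rest (PySem.Set.add seen stripped)
    else
      pvDedupPass rest seen

-- second loop of A: drop a blank line that follows a blank line
def pvCollapsePass (lines : List String) (prev_empty : Bool) : List String :=
  match lines with
  | [] => []
  | line :: rest =>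
    let is_empty := PySem.Str.strip line = ""
    if is_empty ∧ prev_empty then
      pvCollapsePass rest prev_empty
    else
      line :: pvCollapsePass rest is_empty

def optimize_program_py (program : String) : String :=
  PySem.Str.join "\n" (pvCollapsePass (pvDedupPass (((PySem.Str.split? program "\n").getD [])) PySem.Set.empty) false)

-- ===== PORT B =====
-- B's single fused loop over the lines, carrying (seen, prev_empty) together
def pvFusedPass (lines : List String) (seen : PySem.Set String) (prev_empty : Bool) : List String :=
  match lines with
  | [] => []
  | line :: rest =>
    let stripped := PySem.Str.strip line
    let is_code := stripped ≠ "" ∧ ¬ PySem.Str.startswith stripped "#"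
    if is_code ∧ stripped ∈ seen then
      pvFusedPass rest seen prev_empty
    else
      let seen' := if is_code then PySem.Set.add seen stripped else seen
      let is_empty := stripped = ""
      if is_empty ∧ prev_empty then
        pvFusedPass rest seen' prev_empty
      else
        line :: pvFusedPass rest seen' is_empty

def optimize_program_py_alt (program : String) : String :=
  PySem.Str.join "\n" (pvFusedPass (((PySem.Str.split? program "\n").getD [])) PySem.Set.empty false)

-- ===== PRECONDITION & SPEC =====
def Spec_optimize_program_py (program : String) (out : String) : Prop := out = optimize_program_py_alt program
instance (program : String) (out : String) : Decidable (Spec_optimize_program_py program out) := by unfold Spec_optimize_program_py; infer_instance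

-- ===== CLAIM (what is proved, stated in full; the proofs are below) =====
def Claim_equal_optimize_program_py : Prop := ∀ (program : String), Dom_optimize_program_py program → Spec_optimize_program_py program (optimize_program_py program)

-- ===== LEMMAS AND PROOFS =====

-- fusion invariant: running A's second pass over the output of its first pass
-- equals B's single fused pass, for every seen-set and prev_empty flag
theorem pvFusion (lines : List String) (seen : PySem.Set String) (prev_empty : Bool) :
    pvCollapsePass (pvDedupPass lines seen) prev_empty = pvFusedPass lines seen prev_empty := by
  induction lines generalizing seen prev_empty with
  | nil => rfl
  | cons line rest ih =>
    by_cases hs : PySem.Str.strip line = "" <;>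
    by_cases hc : PySem.Chars.startswith (PySem.Chars.strip line.toList) ['#'] = true <;>
    by_cases hm : PySem.Str.strip line ∈ seen <;>
    by_cases hp : prev_empty = true <;>
    simp [pvDedupPass, pvFusedPass, pvCollapsePass, hs, hc, hm, hp, ih]

-- ===== VERDICT (by name: the statement is the Claim_ definition above) =====
theorem optimize_program_py_spec : Claim_equal_optimize_program_py := by
  intro program _
  unfold Spec_optimize_program_py optimize_program_py optimize_program_py_alt
  rw [pvFusion]
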